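-- pv_equiv track=rewrite | github.com/pratyush06/competitive-programming | dynamic_programming/uva-11456-trainsort.py | train_sort
-- ===== SOURCE A (Python) =====
-- def train_sort(weights):
--     n = len(weights)
--     lis = [1] * n
--     lds = [1] * n
--
--     # Process from right to left
--     for i in range(n-1, -1, -1):
--         for j in range(i+1, n):
--             if weights[i] < weights[j]:
--                 # Car j is heavier -> can go in front
--                 # This contributes to increasing sequence from i
--                 lis[i] = max(lis[i], 1 + lis[j])
--             elif weights[i] > weights[j]:
--                 # Car j is lighter -> can go in back
--                 # This contributes to decreasing sequence from i
--                 lds[i] = max(lds[i], 1 + lds[j])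
--
--     # Find the best starting car
--     max_length = 0
--     for i in range(n):
--         # we are doing -1 bcz largest element will present at end of lis and at begenning of lds
--         max_length = max(max_length, lis[i] + lds[i] - 1)
--
--     return max_length
-- ===== SOURCE B (Python) =====
-- from bisect import bisect_left
--
--
-- def _inc_end_lengths(ws):
--     """For each position, the length of the longest strictly increasing
--     subsequence ending there, via patience sorting (O(n log n))."""
--     tails = []
--     out = []
--     for w in ws:
--         k = bisect_left(tails, w)
--         if k == len(tails):
--             tails.append(w)
--         else:
--             tails[k] = w
--         out.append(k + 1)
--     return out
--
--
-- def train_sort(weights):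
--     rev = weights[::-1]
--     # LIS starting at i in `weights` = increasing-ending length at the mirrored
--     # position of the negated reversed list; LDS starting at i likewise on the
--     # reversed list itself.
--     inc = _inc_end_lengths([-w for w in rev])
--     dec = _inc_end_lengths(rev)
--     return max((a + b - 1 for a, b in zip(inc, dec)), default=0)
-- ===== Notes on version B (the rewrite author's own statement) =====
-- stated objective: faster
-- what changed: Replaces the O(n^2) nested-loop DP over suffix indices by two patience-sorting (bisect) passes over the reversed list that compute per-position LIS/LDS lengths in O(n log n), combined with one zip-max.
import Mathlib
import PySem

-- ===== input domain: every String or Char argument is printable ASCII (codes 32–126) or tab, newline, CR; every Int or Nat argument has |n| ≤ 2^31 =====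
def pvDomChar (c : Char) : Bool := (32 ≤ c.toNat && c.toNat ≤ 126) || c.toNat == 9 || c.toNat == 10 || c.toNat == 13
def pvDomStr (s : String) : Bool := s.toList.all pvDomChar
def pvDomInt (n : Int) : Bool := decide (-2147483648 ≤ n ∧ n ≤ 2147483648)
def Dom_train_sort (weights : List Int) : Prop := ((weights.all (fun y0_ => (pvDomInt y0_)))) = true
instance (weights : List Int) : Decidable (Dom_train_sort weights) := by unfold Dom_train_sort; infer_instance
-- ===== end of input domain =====

-- B replaces A's O(n^2) nested-loop DP by two patience-sorting (bisect) passes over the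
-- reversed list (per-position LIS/LDS lengths) combined with one zip-max; objective: faster.

-- ===== PORT A =====
def train_sort (weights : List Int) : Int :=
  let n : Int := PySem.List.len weights
  -- [1] * n
  let lis : List Int := List.replicate weights.length 1
  let lds : List Int := List.replicate weights.length 1
  -- for i in range(n-1, -1, -1): for j in range(i+1, n): …
  let p : List Int × List Int :=
    (PySem.List.pyRange (n - 1) (-1) (-1)).foldl (fun st i =>
      (PySem.List.pyRange (i + 1) n 1).foldl (fun (st : List Int × List Int) j =>
        if PySem.List.pyGetD weights i 0 < PySem.List.pyGetD weights j 0 then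
          (PySem.List.pySetD st.1 i
              (max (PySem.List.pyGetD st.1 i 0) (1 + PySem.List.pyGetD st.1 j 0)), st.2)
        else if PySem.List.pyGetD weights i 0 > PySem.List.pyGetD weights j 0 then
          (st.1, PySem.List.pySetD st.2 i
              (max (PySem.List.pyGetD st.2 i 0) (1 + PySem.List.pyGetD st.2 j 0)))
        else st) st) (lis, lds)
  -- max_length loop
  (PySem.List.pyRange 0 n 1).foldl (fun m i =>
    max m (PySem.List.pyGetD p.1 i 0 + PySem.List.pyGetD p.2 i 0 - 1)) 0

-- ===== PORT B =====
-- _inc_end_lengths: patience sorting; state = (tails, out), returns out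
def incEndLengths (ws : List Int) : List Int :=
  (ws.foldl (fun (st : List Int × List Int) w =>
    let k := PySem.List.bisectLeft st.1 w
    let tails := if k = st.1.length then st.1 ++ [w] else st.1.set k w
    (tails, st.2 ++ [(k : Int) + 1])) ([], [])).2

def train_sort_alt (weights : List Int) : Int :=
  -- rev = weights[::-1]
  let rev : List Int := (PySem.List.slice? weights none none (-1)).getD []
  let inc := incEndLengths (rev.map (fun w => -w))
  let dec := incEndLengths rev
  -- max((a + b - 1 for a, b in zip(inc, dec)), default=0)
  PySem.List.maxD ((inc.zip dec).map (fun p => p.1 + p.2 - 1)) (fun y => y) 0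

-- ===== PRECONDITION & SPEC =====
def Spec_train_sort (weights : List Int) (out : Int) : Prop := out = train_sort_alt weights
instance (weights : List Int) (out : Int) : Decidable (Spec_train_sort weights out) := by unfold Spec_train_sort; infer_instance

-- ===== CLAIM (what is proved, stated in full; the proofs are below) =====
def Claim_equal_train_sort : Prop := ∀ (weights : List Int), Dom_train_sort weights → Spec_train_sort weights (train_sort weights)

-- ===== LEMMAS AND PROOFS =====

-- Reference DP (proof-side only): longest strictly increasing run ending lengths,
-- computed left-to-right with the list `seen` of (value, dp) pairs.
def maxUnder (seen : List (Int × Int)) (w : Int) : Int :=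
  seen.foldl (fun m p => if p.1 < w then max m p.2 else m) 0

def dpGo (seen : List (Int × Int)) : List Int → List Int
  | [] => []
  | w :: l => (1 + maxUnder seen w) :: dpGo (seen ++ [(w, 1 + maxUnder seen w)]) l

-- Reference DP for A's direction: value per index computed over the suffix.
def maxSel (cmp : Int → Int → Bool) (w : Int) (l : List (Int × Int)) : Int :=
  l.foldl (fun m p => if cmp w p.1 then max m p.2 else m) 0

def dpStart (cmp : Int → Int → Bool) : List Int → List Int
  | [] => []
  | w :: l => (1 + maxSel cmp w (l.zip (dpStart cmp l))) :: dpStart cmp l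

-- generic facts about the `if … then max … else` folds
theorem foldl_ifmax_init_le {α : Type} (c : α → Prop) [DecidablePred c] (v : α → Int) :
    ∀ (l : List α) (i : Int), i ≤ l.foldl (fun m p => if c p then max m (v p) else m) i := by
  intro l
  induction l with
  | nil => intro i; simp
  | cons x t ih =>
    intro i
    simp only [List.foldl_cons]
    refine le_trans ?_ (ih _)
    split
    · exact le_max_left _ _
    · exact le_refl _

theorem foldl_ifmax_reverse {α : Type} (c : α → Prop) [DecidablePred c] (v : α → Int) :
    ∀ (l : List α) (i : Int),
      l.reverse.foldl (fun m p => if c p then max m (v p) else m) i =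
      l.foldl (fun m p => if c p then max m (v p) else m) i := by
  intro l
  set f : Int → α → Int := fun m p => if c p then max m (v p) else m with hf
  have hswap : ∀ (i : Int) (x y : α), f (f i x) y = f (f i y) x := by
    intro i x y
    simp only [hf]
    by_cases hx : c x <;> by_cases hy : c y <;> simp [hx, hy, max_right_comm]
  have hcomm : ∀ (t : List α) (i : Int) (x : α), f (t.foldl f i) x = t.foldl f (f i x) := by
    intro t
    induction t with
    | nil => intro i x; rfl
    | cons y t ih =>
      intro i x
      simp only [List.foldl_cons]
      rw [ih, hswap]
  induction l with
  | nil => intro i; rfl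
  | cons x t ih =>
    intro i
    rw [List.reverse_cons, List.foldl_append]
    simp only [List.foldl_cons, List.foldl_nil]
    rw [ih, hcomm]

theorem maxSel_nonneg (cmp : Int → Int → Bool) (w : Int) (l : List (Int × Int)) :
    0 ≤ maxSel cmp w l := by
  have := foldl_ifmax_init_le (fun p : Int × Int => cmp w p.1 = true) (fun p => p.2) l 0
  simpa [maxSel] using this

theorem maxUnder_append (seen : List (Int × Int)) (q : Int × Int) (w : Int) :
    maxUnder (seen ++ [q]) w = if q.1 < w then max (maxUnder seen w) q.2 else maxUnder seen w := by
  simp [maxUnder, List.foldl_append]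

theorem maxUnder_reverse (seen : List (Int × Int)) (w : Int) :
    maxUnder seen.reverse w = maxUnder seen w := by
  have := foldl_ifmax_reverse (fun p : Int × Int => p.1 < w) (fun p => p.2) seen 0
  simpa [maxUnder] using this

theorem length_dpStart (cmp : Int → Int → Bool) (l : List Int) :
    (dpStart cmp l).length = l.length := by
  induction l with
  | nil => rfl
  | cons w t ih => simp [dpStart, ih]

theorem dpStart_pos (cmp : Int → Int → Bool) (l : List Int) :
    ∀ d ∈ dpStart cmp l, 1 ≤ d := by
  induction l with
  | nil => simp [dpStart]
  | cons w t ih =>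
    intro d hd
    simp only [dpStart, List.mem_cons] at hd
    rcases hd with h | h
    · have := maxSel_nonneg cmp w (t.zip (dpStart cmp t)); omega
    · exact ih d h

-- dpGo on a snoc
theorem dpGo_append (v : Int) :
    ∀ (l : List Int) (seen : List (Int × Int)),
      dpGo seen (l ++ [v]) =
        dpGo seen l ++ [1 + maxUnder (seen ++ l.zip (dpGo seen l)) v] := by
  intro l
  induction l with
  | nil => intro seen; simp [dpGo]
  | cons w t ih =>
    intro seen
    simp [dpGo, ih, List.append_assoc]

theorem zip_reverse_of_length_eq {α β : Type} :
    ∀ (l1 : List α) (l2 : List β), l1.length = l2.length →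
      l1.reverse.zip l2.reverse = (l1.zip l2).reverse := by
  intro l1
  induction l1 with
  | nil =>
    intro l2 h
    cases l2 with
    | nil => rfl
    | cons b t2 => simp at h
  | cons a t1 ih =>
    intro l2 h
    cases l2 with
    | nil => simp at h
    | cons b t2 =>
      have hlen : t1.length = t2.length := by simpa using h
      simp only [List.reverse_cons, List.zip_cons_cons]
      rw [List.zip_append (by simpa using hlen), ih t2 hlen]
      simp

-- translating the condition through an order-reversing relabelling f
theorem maxUnder_zip_map (cmp : Int → Int → Bool) (f : Int → Int)
    (hf : ∀ a b : Int, (f b < f a) ↔ cmp a b = true) (w : Int) :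
    ∀ (l ds : List Int), maxUnder ((l.map f).zip ds) (f w) = maxSel cmp w (l.zip ds) := by
  intro l ds
  unfold maxUnder maxSel
  rw [List.zip_map_left, List.foldl_map]
  apply PySem.List.foldl_congr_mem
  intro acc p _
  simp [Prod.map, hf w p.1]

-- B's per-pass values are A-direction dp values, reversed
theorem dpStart_eq_reverse_dpGo (cmp : Int → Int → Bool) (f : Int → Int)
    (hf : ∀ a b : Int, (f b < f a) ↔ cmp a b = true) :
    ∀ l : List Int, dpStart cmp l = (dpGo [] ((l.map f).reverse)).reverse := by
  intro l
  induction l with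
  | nil => rfl
  | cons w t ih =>
    have hds : dpGo [] ((t.map f).reverse) = (dpStart cmp t).reverse := by
      rw [ih, List.reverse_reverse]
    simp only [dpStart, List.map_cons, List.reverse_cons]
    rw [dpGo_append, hds, List.nil_append, List.reverse_append, List.reverse_singleton,
        List.singleton_append, List.reverse_reverse]
    congr 2
    rw [zip_reverse_of_length_eq _ _ (by simp [length_dpStart]), maxUnder_reverse,
        maxUnder_zip_map cmp f hf]

-- countP of a prefix-true/suffix-false predicate
theorem countP_split {α : Type} (p : α → Bool) :
    ∀ (xs : List α) (k : Nat), k ≤ xs.length →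
      (∀ (j : Nat) (hj : j < xs.length), j < k → p xs[j] = true) →
      (∀ (j : Nat) (hj : j < xs.length), k ≤ j → p xs[j] = false) →
      xs.countP p = k := by
  intro xs
  induction xs with
  | nil =>
    intro k hk _ _
    simp only [List.length_nil, Nat.le_zero] at hk
    simp [hk]
  | cons x t ih =>
    intro k hk htrue hfalse
    cases k with
    | zero =>
      rw [List.countP_eq_zero]
      intro y hy
      obtain ⟨j, hj, rfl⟩ := List.mem_iff_getElem.mp hy
      simp [hfalse j hj (Nat.zero_le _)]
    | succ k =>
      have hx : p x = true := htrue 0 (by simp) (Nat.succ_pos _)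
      rw [List.countP_cons_of_pos hx, ih k (by simpa using hk)
        (fun j hj hjk => by simpa using htrue (j + 1) (by simpa using hj) (by omega))
        (fun j hj hjk => by simpa using hfalse (j + 1) (by simpa using hj) (by omega))]

-- the patience invariant
def PatInv (tails : List Int) (seen : List (Int × Int)) : Prop :=
  tails.Pairwise (· < ·) ∧ ∀ w : Int, (tails.countP (· < w) : Int) = maxUnder seen w

theorem bisectLeft_eq_countP (tails : List Int) (w : Int) (hs : tails.Pairwise (· < ·)) :
    PySem.List.bisectLeft tails w = tails.countP (· < w) := by
  obtain ⟨hk, hlt, hge⟩ := PySem.List.bisectLeft_spec tails w (hs.imp (fun h => le_of_lt h))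
  exact (countP_split _ tails _ hk
    (fun j hj hjk => decide_eq_true (hlt j hj hjk))
    (fun j hj hjk => decide_eq_false (not_lt.mpr (hge j hj hjk)))).symm

theorem inv_step (tails : List Int) (seen : List (Int × Int)) (w0 : Int) (h : PatInv tails seen) :
    PatInv (if PySem.List.bisectLeft tails w0 = tails.length then tails ++ [w0]
         else tails.set (PySem.List.bisectLeft tails w0) w0)
        (seen ++ [(w0, 1 + maxUnder seen w0)]) := by
  obtain ⟨hsort, hcnt⟩ := h
  obtain ⟨hk, hlt, hge⟩ := PySem.List.bisectLeft_spec tails w0 (hsort.imp (fun h => le_of_lt h))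
  have hkc : (tails.countP (· < w0) : Int) = (PySem.List.bisectLeft tails w0 : Int) := by
    rw [bisectLeft_eq_countP tails w0 hsort]
  have hM0 : maxUnder seen w0 = (PySem.List.bisectLeft tails w0 : Int) := by
    rw [← hcnt w0, hkc]
  have hsum : ∀ (u v2 : List Int) (a w : Int),
      (((u ++ a :: v2).countP (· < w) : Nat) : Int) =
        (u.countP (· < w) : Int) + (if a < w then 1 else 0) + (v2.countP (· < w) : Int) := by
    intro u v2 a w
    by_cases hh : a < w <;> simp [List.countP_append, List.countP_cons, hh] <;> push_cast <;> ring
  by_cases hcase : PySem.List.bisectLeft tails w0 = tails.length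
  · -- append case: every tail is < w0
    have hall : ∀ x ∈ tails, x < w0 := by
      intro x hx
      obtain ⟨j, hj, rfl⟩ := List.mem_iff_getElem.mp hx
      exact hlt j hj (by omega)
    rw [if_pos hcase]
    constructor
    · rw [List.pairwise_append]
      refine ⟨hsort, List.pairwise_singleton _ _, fun x hx y hy => ?_⟩
      simp only [List.mem_singleton] at hy
      subst hy
      exact hall x hx
    · intro w
      rw [maxUnder_append, ← hcnt w]
      have hle : tails.countP (· < w) ≤ tails.length := List.countP_le_length
      by_cases hw : w0 < w
      · have h1 : tails.countP (· < w) = tails.length :=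
          List.countP_eq_length.mpr (fun x hx => decide_eq_true (lt_trans (hall x hx) hw))
        simp only [if_pos hw, hM0, hcase, List.countP_append, List.countP_cons, h1]
        have : ([] : List Int).countP (· < w) = 0 := rfl
        simp [hw]
        push_cast
        omega
      · simp only [if_neg hw, List.countP_append, List.countP_cons]
        simp [hw]
  · -- replace case: tails[k] is the first element ≥ w0
    have hklt : PySem.List.bisectLeft tails w0 < tails.length := lt_of_le_of_ne hk hcase
    set k := PySem.List.bisectLeft tails w0 with hkdef
    set t1 := tails.take k with ht1
    set t2 := tails.drop (k + 1) with ht2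
    have htails : tails = t1 ++ tails[k] :: t2 := by
      rw [ht1, ht2, ← List.drop_eq_getElem_cons hklt, List.take_append_drop]
    have ht1len : t1.length = k := by
      rw [ht1, List.length_take]
      omega
    have hset : tails.set k w0 = t1 ++ w0 :: t2 := List.set_eq_take_cons_drop w0 hklt
    have f1 : ∀ x ∈ t1, x < w0 := by
      intro x hx
      obtain ⟨j, hj, rfl⟩ := List.mem_iff_getElem.mp hx
      have hjk : j < k := by rw [ht1, List.length_take] at hj; omega
      have hjl : j < tails.length := by omega
      have heq : t1[j] = tails[j]'hjl := by
        simp [ht1, List.getElem_take]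
      rw [heq]
      exact hlt j hjl hjk
    have f2 : w0 ≤ tails[k] := hge k hklt (le_refl _)
    have hsort' := hsort
    rw [htails, List.pairwise_append, List.pairwise_cons] at hsort'
    obtain ⟨pw1, ⟨f3, pw2⟩, cross⟩ := hsort'
    rw [if_neg hcase, hset]
    constructor
    · rw [List.pairwise_append, List.pairwise_cons]
      refine ⟨pw1, ⟨fun x hx => lt_of_le_of_lt f2 (f3 x hx), pw2⟩, fun x hx y hy => ?_⟩
      rcases List.mem_cons.mp hy with rfl | hy2
      · exact f1 x hx
      · exact lt_trans (f1 x hx) (lt_of_le_of_lt f2 (f3 y hy2))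
    · intro w
      have hold : (tails.countP (· < w) : Int) =
          (t1.countP (· < w) : Int) + (if tails[k] < w then 1 else 0) + (t2.countP (· < w) : Int) := by
        conv_lhs => rw [htails]
        exact hsum t1 t2 tails[k] w
      rw [maxUnder_append, ← hcnt w, hM0, hsum t1 t2 w0 w, hold]
      have hc1le : t1.countP (· < w) ≤ k := ht1len ▸ List.countP_le_length
      by_cases hw : w0 < w
      · have hc1 : t1.countP (· < w) = k := by
          rw [← ht1len]
          exact List.countP_eq_length.mpr (fun x hx => decide_eq_true (lt_trans (f1 x hx) hw))
        by_cases htkw : tails[k] < w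
        · simp only [if_pos hw, if_pos htkw, hc1]
          push_cast
          omega
        · have hc2 : t2.countP (· < w) = 0 :=
            List.countP_eq_zero.mpr (fun x hx => by
              simp only [decide_eq_true_eq]
              intro hxw
              exact htkw (lt_trans (f3 x hx) hxw))
          simp only [if_pos hw, if_neg htkw, hc1, hc2]
          push_cast
          omega
      · have htkw : ¬ tails[k] < w := fun hh => hw (lt_of_le_of_lt f2 hh)
        simp only [if_neg hw, if_neg htkw]

-- B's fold computes dpGo
theorem incEnd_fold_eq_dpGo :
    ∀ (l : List Int) (tails : List Int) (out : List Int) (seen : List (Int × Int)),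
      PatInv tails seen →
      (l.foldl (fun (st : List Int × List Int) w =>
        let k := PySem.List.bisectLeft st.1 w
        let tails := if k = st.1.length then st.1 ++ [w] else st.1.set k w
        (tails, st.2 ++ [(k : Int) + 1])) (tails, out)).2 = out ++ dpGo seen l := by
  intro l
  induction l with
  | nil => intro tails out seen _; simp [dpGo]
  | cons w t ih =>
    intro tails out seen hinv
    have hkint : ((PySem.List.bisectLeft tails w : Nat) : Int) + 1 = 1 + maxUnder seen w := by
      rw [← hinv.2 w, bisectLeft_eq_countP tails w hinv.1]
      ring
    simp only [List.foldl_cons]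
    have hstep := ih (if PySem.List.bisectLeft tails w = tails.length then tails ++ [w]
        else tails.set (PySem.List.bisectLeft tails w) w)
      (out ++ [((PySem.List.bisectLeft tails w : Nat) : Int) + 1])
      (seen ++ [(w, 1 + maxUnder seen w)]) (inv_step tails seen w hinv)
    have hfin : (out ++ [((PySem.List.bisectLeft tails w : Nat) : Int) + 1]) ++
        dpGo (seen ++ [(w, 1 + maxUnder seen w)]) t = out ++ dpGo seen (w :: t) := by
      rw [List.append_assoc, List.singleton_append, hkint, dpGo]
    exact hstep.trans hfin

theorem incEndLengths_eq_dpGo (ws : List Int) : incEndLengths ws = dpGo [] ws := by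
  have h := incEnd_fold_eq_dpGo ws [] [] [] ⟨List.Pairwise.nil, fun w => by simp [maxUnder]⟩
  simpa [incEndLengths] using h

-- ===== A-side characterisation =====

def cmpA : Int → Int → Bool := fun a b => decide (a < b)
def cmpB : Int → Int → Bool := fun a b => decide (b < a)

-- position-i recurrence of dpStart
theorem dpStart_getElem (cmp : Int → Int → Bool) :
    ∀ (ws : List Int) (i : Nat) (h : i < ws.length),
      (dpStart cmp ws)[i]'(by rw [length_dpStart]; exact h) =
        1 + maxSel cmp ws[i] ((ws.drop (i + 1)).zip ((dpStart cmp ws).drop (i + 1))) := by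
  intro ws
  induction ws with
  | nil => intro i h; simp at h
  | cons w t ih =>
    intro i h
    cases i with
    | zero => simp [dpStart]
    | succ i =>
      simp only [dpStart, List.getElem_cons_succ, List.drop_succ_cons]
      exact ih i (by simpa using h)

-- index/set helpers (all indices produced by pyRange here are ≥ 0)
theorem pyGetD_pySetD_lt (a : List Int) (m : Nat) (j v : Int) (hj : (m : Int) < j) :
    PySem.List.pyGetD (PySem.List.pySetD a (m : Int) v) j 0 = PySem.List.pyGetD a j 0 := by
  have h0 : (0 : Int) ≤ j := by omega
  rw [PySem.List.pySetD_natCast, PySem.List.pyGetD_of_nonneg _ _ h0,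
      PySem.List.pyGetD_of_nonneg _ _ h0]
  simp only [List.getD]
  rw [List.getElem?_set_ne (by omega : m ≠ j.toNat)]

theorem pyGetD_pySetD_self (a : List Int) (m : Nat) (v : Int) (hm : m < a.length) :
    PySem.List.pyGetD (PySem.List.pySetD a (m : Int) v) (m : Int) 0 = v := by
  rw [PySem.List.pySetD_natCast, PySem.List.pyGetD_natCast]
  simp [List.getD, List.getElem?_set_self (by simpa using hm)]

theorem pySetD_pySetD (a : List Int) (m : Nat) (v v' : Int) :
    PySem.List.pySetD (PySem.List.pySetD a (m : Int) v) (m : Int) v' =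
      PySem.List.pySetD a (m : Int) v' := by
  simp [List.set_set]

-- a fold whose every write hits cell m and whose reads at j > m see the original list
theorem setcell_aux (ws a0 : List Int) (c : Int → Prop) [DecidablePred c] (m : Nat)
    (hm : m < a0.length) :
    ∀ (js : List Int), (∀ j ∈ js, (m : Int) < j) → ∀ (v : Int),
      js.foldl (fun a j =>
          if c (PySem.List.pyGetD ws j 0) then
            PySem.List.pySetD a (m : Int)
              (max (PySem.List.pyGetD a (m : Int) 0) (1 + PySem.List.pyGetD a j 0))
          else a) (PySem.List.pySetD a0 (m : Int) v)
      = PySem.List.pySetD a0 (m : Int)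
          (js.foldl (fun v j =>
              if c (PySem.List.pyGetD ws j 0) then
                max v (1 + PySem.List.pyGetD a0 j 0) else v) v) := by
  intro js
  induction js with
  | nil => intro _ v; simp
  | cons j t ih =>
    intro hb v
    have hj := hb j (List.mem_cons_self)
    simp only [List.foldl_cons]
    by_cases hc : c (PySem.List.pyGetD ws j 0)
    · rw [if_pos hc, if_pos hc, pyGetD_pySetD_self a0 m v hm, pyGetD_pySetD_lt a0 m j v hj,
          pySetD_pySetD]
      exact ih (fun x hx => hb x (List.mem_cons_of_mem _ hx)) _
    · rw [if_neg hc, if_neg hc]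
      exact ih (fun x hx => hb x (List.mem_cons_of_mem _ hx)) v

-- the masked state after the outer loop has handled indices ≥ k
def mask (k : Nat) (L : List Int) : List Int := List.replicate k 1 ++ L.drop k

theorem length_mask (k : Nat) (L : List Int) (hk : k ≤ L.length) :
    (mask k L).length = L.length := by
  simp [mask]
  omega

theorem mask_drop (k : Nat) (L : List Int) : (mask k L).drop k = L.drop k := by
  have h := List.drop_left (l₁ := List.replicate k (1 : Int)) (l₂ := L.drop k)
  simpa [mask] using h

theorem mask_set_mid (m : Nat) (L : List Int) (v : Int) :
    (mask (m + 1) L).set m v = List.replicate m 1 ++ v :: L.drop (m + 1) := by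
  rw [mask, List.replicate_succ', List.append_assoc,
      List.set_append_right _ _ (by simp),
      List.length_replicate]
  simp

theorem mask_set (m : Nat) (L : List Int) (hm : m < L.length) :
    PySem.List.pySetD (mask (m + 1) L) (m : Int) (L[m]) = mask m L := by
  rw [PySem.List.pySetD_natCast, mask_set_mid, mask, ← List.drop_eq_getElem_cons hm]

theorem mask_eq_set_one (m : Nat) (L : List Int) :
    PySem.List.pySetD (mask (m + 1) L) (m : Int) 1 = mask (m + 1) L := by
  rw [PySem.List.pySetD_natCast, mask_set_mid, mask, List.replicate_succ', List.append_assoc]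
  simp

theorem zip_drop {α β : Type} :
    ∀ (l : List α) (l' : List β) (n : Nat), (l.zip l').drop n = (l.drop n).zip (l'.drop n) := by
  intro l
  induction l with
  | nil => intro l' n; simp
  | cons a t ih =>
    intro l' n
    cases l' with
    | nil => simp
    | cons b t' =>
      cases n with
      | zero => simp
      | succ n => simpa using ih t' n

theorem foldl_one_shift (cp : Int × Int → Prop) [DecidablePred cp] :
    ∀ (l : List (Int × Int)), (∀ p ∈ l, cp p → 0 ≤ p.2) → ∀ v : Int, 0 ≤ v →
      l.foldl (fun v p => if cp p then max v (1 + p.2) else v) (1 + v)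
        = 1 + l.foldl (fun v p => if cp p then max v p.2 else v) v := by
  intro l
  induction l with
  | nil => intro _ v _; rfl
  | cons p t ih =>
    intro hp v hv
    simp only [List.foldl_cons]
    by_cases hc : cp p
    · rw [if_pos hc, if_pos hc]
      have h2 := hp p (List.mem_cons_self) hc
      have hmx : max (1 + v) (1 + p.2) = 1 + max v p.2 := by omega
      rw [hmx]
      exact ih (fun q hq => hp q (List.mem_cons_of_mem _ hq)) _ (by omega)
    · rw [if_neg hc, if_neg hc]
      exact ih (fun q hq => hp q (List.mem_cons_of_mem _ hq)) v hv

-- one inner pass, single component: writes the dpStart value into cell m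
theorem cell_value (ws : List Int) (cmp : Int → Int → Bool) (c : Int → Prop) [DecidablePred c]
    (m : Nat) (hm : m < ws.length)
    (hcc : ∀ x, c x ↔ cmp (ws[m]) x = true) :
    (PySem.List.pyRange ((m : Int) + 1) ((ws.length : Nat) : Int) 1).foldl
      (fun a j => if c (PySem.List.pyGetD ws j 0) then
          PySem.List.pySetD a (m : Int)
            (max (PySem.List.pyGetD a (m : Int) 0) (1 + PySem.List.pyGetD a j 0)) else a)
      (mask (m + 1) (dpStart cmp ws))
    = mask m (dpStart cmp ws) := by
  set L := dpStart cmp ws with hLdef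
  have hL : L.length = ws.length := length_dpStart cmp ws
  have hmlen : m < (mask (m + 1) L).length := by
    rw [length_mask _ _ (by omega)]
    omega
  have hzlen : (ws.zip (mask (m + 1) L)).length = ws.length := by
    simp [List.length_zip, length_mask _ _ (by omega : m + 1 ≤ L.length), hL]
  conv_lhs => rw [← mask_eq_set_one m L]
  rw [setcell_aux ws (mask (m + 1) L) c m hmlen _
      (fun j hj => by
        have := (PySem.List.mem_pyRange_one.mp hj).1
        omega) 1]
  -- turn the two indexed reads into one read of the zipped list
  have hcongr : (PySem.List.pyRange ((m : Int) + 1) ((ws.length : Nat) : Int) 1).foldl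
      (fun v j => if c (PySem.List.pyGetD ws j 0) then
        max v (1 + PySem.List.pyGetD (mask (m + 1) L) j 0) else v) 1
    = (PySem.List.pyRange ((m : Int) + 1) ((ws.length : Nat) : Int) 1).foldl
      (fun v j => (fun (v : Int) (p : Int × Int) => if c p.1 then max v (1 + p.2) else v) v
        (PySem.List.pyGetD (ws.zip (mask (m + 1) L)) j (0, 0))) 1 := by
    apply PySem.List.foldl_congr_mem
    intro acc j hj
    obtain ⟨hj1, hj2⟩ := PySem.List.mem_pyRange_one.mp hj
    have h0 : (0 : Int) ≤ j := by omega
    have hjw : j < (ws.length : Int) := by exact_mod_cast hj2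
    have hjn : j.toNat < ws.length := by omega
    rw [PySem.List.pyGetD_eq_getElem ws 0 h0 hjw,
        PySem.List.pyGetD_eq_getElem (mask (m + 1) L) 0 h0
          (by rw [length_mask _ _ (by omega : m + 1 ≤ L.length), hL]; exact hjw),
        PySem.List.pyGetD_eq_getElem (ws.zip (mask (m + 1) L)) (0, 0) h0
          (by rw [hzlen]; exact hjw)]
    simp [List.getElem_zip]
  rw [hcongr]
  have hbound : ((ws.length : Nat) : Int) = ((ws.zip (mask (m + 1) L)).length : Int) := by
    rw [hzlen]
  rw [hbound, PySem.List.foldl_pyRange_pyGetD' (ws.zip (mask (m + 1) L)) (0, 0)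
      (fun (v : Int) (p : Int × Int) => if c p.1 then max v (1 + p.2) else v) 1
      (by omega : (0 : Int) ≤ (m : Int) + 1)]
  have htn : ((m : Int) + 1).toNat = m + 1 := by omega
  rw [htn, zip_drop, mask_drop]
  -- 1 + (fold from 0) and the dpStart recurrence
  have hshift := foldl_one_shift (fun p : Int × Int => c p.1)
      ((ws.drop (m + 1)).zip (L.drop (m + 1)))
      (fun p hp _ => by
        have hp2 := (List.of_mem_zip hp).2
        have := dpStart_pos cmp ws p.2 (List.mem_of_mem_drop hp2)
        omega) 0 (le_refl 0)
  norm_num at hshift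
  rw [hshift]
  have hsel : ((ws.drop (m + 1)).zip (L.drop (m + 1))).foldl
      (fun v (p : Int × Int) => if c p.1 then max v p.2 else v) 0
      = maxSel cmp (ws[m]) ((ws.drop (m + 1)).zip (L.drop (m + 1))) := by
    unfold maxSel
    apply PySem.List.foldl_congr_mem
    intro acc p _
    by_cases h : c p.1
    · rw [if_pos h, if_pos ((hcc p.1).mp h)]
    · rw [if_neg h, if_neg (fun hh => h ((hcc p.1).mpr hh))]
  rw [hsel, ← dpStart_getElem cmp ws m hm]
  exact mask_set m L (by omega)

-- one inner pass on the pair state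
theorem inner_step (ws : List Int) (m : Nat) (hm : m < ws.length) :
    (PySem.List.pyRange ((m : Int) + 1) ((ws.length : Nat) : Int) 1).foldl
      (fun (st : List Int × List Int) j =>
        if PySem.List.pyGetD ws (m : Int) 0 < PySem.List.pyGetD ws j 0 then
          (PySem.List.pySetD st.1 (m : Int)
            (max (PySem.List.pyGetD st.1 (m : Int) 0) (1 + PySem.List.pyGetD st.1 j 0)), st.2)
        else if PySem.List.pyGetD ws (m : Int) 0 > PySem.List.pyGetD ws j 0 then
          (st.1, PySem.List.pySetD st.2 (m : Int)
            (max (PySem.List.pyGetD st.2 (m : Int) 0) (1 + PySem.List.pyGetD st.2 j 0)))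
        else st)
      (mask (m + 1) (dpStart cmpA ws), mask (m + 1) (dpStart cmpB ws))
    = (mask m (dpStart cmpA ws), mask m (dpStart cmpB ws)) := by
  have hwm : PySem.List.pyGetD ws (m : Int) 0 = ws[m] := by
    rw [PySem.List.pyGetD_natCast]
    exact List.getD_eq_getElem _ _ hm
  have hbody : (fun (st : List Int × List Int) (j : Int) =>
        if PySem.List.pyGetD ws (m : Int) 0 < PySem.List.pyGetD ws j 0 then
          (PySem.List.pySetD st.1 (m : Int)
            (max (PySem.List.pyGetD st.1 (m : Int) 0) (1 + PySem.List.pyGetD st.1 j 0)), st.2)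
        else if PySem.List.pyGetD ws (m : Int) 0 > PySem.List.pyGetD ws j 0 then
          (st.1, PySem.List.pySetD st.2 (m : Int)
            (max (PySem.List.pyGetD st.2 (m : Int) 0) (1 + PySem.List.pyGetD st.2 j 0)))
        else st)
      = (fun (st : List Int × List Int) (j : Int) =>
        ((fun (a : List Int) (j : Int) =>
            if PySem.List.pyGetD ws (m : Int) 0 < PySem.List.pyGetD ws j 0 then
              PySem.List.pySetD a (m : Int)
                (max (PySem.List.pyGetD a (m : Int) 0) (1 + PySem.List.pyGetD a j 0)) else a) st.1 j,
         (fun (b : List Int) (j : Int) =>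
            if PySem.List.pyGetD ws j 0 < PySem.List.pyGetD ws (m : Int) 0 then
              PySem.List.pySetD b (m : Int)
                (max (PySem.List.pyGetD b (m : Int) 0) (1 + PySem.List.pyGetD b j 0)) else b) st.2 j)) := by
    funext st j
    beta_reduce
    split_ifs with h1 h2 <;> first | rfl | (exact absurd h2 (by omega))
  rw [hbody, PySem.List.foldl_prod_mk
      (f := fun (a : List Int) (j : Int) =>
        if PySem.List.pyGetD ws (m : Int) 0 < PySem.List.pyGetD ws j 0 then
          PySem.List.pySetD a (m : Int)
            (max (PySem.List.pyGetD a (m : Int) 0) (1 + PySem.List.pyGetD a j 0)) else a)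
      (g := fun (b : List Int) (j : Int) =>
        if PySem.List.pyGetD ws j 0 < PySem.List.pyGetD ws (m : Int) 0 then
          PySem.List.pySetD b (m : Int)
            (max (PySem.List.pyGetD b (m : Int) 0) (1 + PySem.List.pyGetD b j 0)) else b)]
  refine Prod.ext ?_ ?_
  · exact cell_value ws cmpA (fun x => PySem.List.pyGetD ws (m : Int) 0 < x) m hm
      (fun x => by rw [hwm]; simp [cmpA])
  · exact cell_value ws cmpB (fun x => x < PySem.List.pyGetD ws (m : Int) 0) m hm
      (fun x => by rw [hwm]; simp [cmpB])

-- the outer countdown loop, from i = m-1 down to 0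
theorem outer_fold (ws : List Int) :
    ∀ (m : Nat), m ≤ ws.length →
      (PySem.List.pyRange ((m : Int) - 1) (-1) (-1)).foldl
        (fun st i =>
          (PySem.List.pyRange (i + 1) ((ws.length : Nat) : Int) 1).foldl
            (fun (st : List Int × List Int) j =>
              if PySem.List.pyGetD ws i 0 < PySem.List.pyGetD ws j 0 then
                (PySem.List.pySetD st.1 i
                  (max (PySem.List.pyGetD st.1 i 0) (1 + PySem.List.pyGetD st.1 j 0)), st.2)
              else if PySem.List.pyGetD ws i 0 > PySem.List.pyGetD ws j 0 then
                (st.1, PySem.List.pySetD st.2 i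
                  (max (PySem.List.pyGetD st.2 i 0) (1 + PySem.List.pyGetD st.2 j 0)))
              else st) st)
        (mask m (dpStart cmpA ws), mask m (dpStart cmpB ws))
      = (dpStart cmpA ws, dpStart cmpB ws) := by
  intro m
  induction m with
  | zero =>
    intro _
    rw [PySem.List.pyRange_neg_one_eq_nil (by omega)]
    simp [mask]
  | succ m ih =>
    intro hle
    have hm : m < ws.length := by omega
    have hc : ((m + 1 : Nat) : Int) - 1 = (m : Int) := by push_cast; ring
    rw [hc, PySem.List.pyRange_neg_one_cons (by omega : (-1 : Int) < (m : Int))]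
    simp only [List.foldl_cons]
    beta_reduce
    rw [inner_step ws m hm]
    have : (m : Int) - 1 = ((m : Nat) : Int) - 1 := by norm_num
    rw [this]
    exact ih (by omega)

theorem train_sort_eq (weights : List Int) :
    train_sort weights =
      ((dpStart cmpA weights).zip (dpStart cmpB weights)).foldl
        (fun m p => max m (p.1 + p.2 - 1)) 0 := by
  have hmaskA : mask weights.length (dpStart cmpA weights) = List.replicate weights.length 1 := by
    simp [mask, List.drop_eq_nil_of_le (le_of_eq (length_dpStart cmpA weights))]
  have hmaskB : mask weights.length (dpStart cmpB weights) = List.replicate weights.length 1 := by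
    simp [mask, List.drop_eq_nil_of_le (le_of_eq (length_dpStart cmpB weights))]
  have h := outer_fold weights weights.length (le_refl _)
  rw [hmaskA, hmaskB] at h
  unfold train_sort
  simp only [PySem.List.len_eq]
  rw [h]
  -- the final max loop over indices becomes a fold over the zipped dp lists
  set A := dpStart cmpA weights with hA
  set B := dpStart cmpB weights with hB
  have hAlen : A.length = weights.length := length_dpStart _ _
  have hBlen : B.length = weights.length := length_dpStart _ _
  have hzlen : (A.zip B).length = weights.length := by simp [List.length_zip, hAlen, hBlen]
  have hcongr : (PySem.List.pyRange 0 ((weights.length : Nat) : Int) 1).foldl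
      (fun m i => max m (PySem.List.pyGetD A i 0 + PySem.List.pyGetD B i 0 - 1)) 0
    = (PySem.List.pyRange 0 ((weights.length : Nat) : Int) 1).foldl
      (fun m i => (fun (m : Int) (p : Int × Int) => max m (p.1 + p.2 - 1)) m
        (PySem.List.pyGetD (A.zip B) i (0, 0))) 0 := by
    apply PySem.List.foldl_congr_mem
    intro acc j hj
    obtain ⟨hj1, hj2⟩ := PySem.List.mem_pyRange_one.mp hj
    rw [PySem.List.pyGetD_eq_getElem A 0 hj1 (by rw [hAlen]; exact hj2),
        PySem.List.pyGetD_eq_getElem B 0 hj1 (by rw [hBlen]; exact hj2),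
        PySem.List.pyGetD_eq_getElem (A.zip B) (0, 0) hj1 (by rw [hzlen]; exact hj2)]
    simp [List.getElem_zip]
  rw [hcongr]
  have hbound : ((weights.length : Nat) : Int) = ((A.zip B).length : Int) := by rw [hzlen]
  rw [hbound, PySem.List.foldl_pyRange_zero_pyGetD' (A.zip B) (0, 0)
      (fun (m : Int) (p : Int × Int) => max m (p.1 + p.2 - 1)) 0]

theorem train_sort_alt_eq (weights : List Int) :
    train_sort_alt weights =
      PySem.List.maxD
        ((((dpStart cmpA weights).zip (dpStart cmpB weights)).reverse).map
          (fun p => p.1 + p.2 - 1)) (fun y => y) 0 := by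
  unfold train_sort_alt
  simp only [PySem.List.slice?_none_none_neg_one, Option.getD_some]
  rw [incEndLengths_eq_dpGo, incEndLengths_eq_dpGo]
  have hA := dpStart_eq_reverse_dpGo cmpA (fun w => -w)
    (by intro a b; simp [cmpA]) weights
  have hB := dpStart_eq_reverse_dpGo cmpB (fun w => w)
    (by intro a b; simp [cmpB]) weights
  have e1 : dpGo [] (weights.reverse.map (fun w => -w)) = (dpStart cmpA weights).reverse := by
    rw [List.map_reverse, hA, List.reverse_reverse]
  have e2 : dpGo [] weights.reverse = (dpStart cmpB weights).reverse := by
    have hid : weights.reverse = ((weights.map (fun w : Int => w)).reverse) := by simp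
    rw [hid, hB, List.reverse_reverse]
  rw [e1, e2, zip_reverse_of_length_eq _ _ (by simp [length_dpStart])]

theorem foldl_max_eq_maxD_reverse (l : List Int) (h1 : ∀ x ∈ l, 1 ≤ x) :
    l.foldl (fun m x => max m x) 0 = PySem.List.maxD l.reverse (fun y => y) 0 := by
  cases l with
  | nil => rfl
  | cons x t =>
    have hne : (x :: t).reverse ≠ [] := by simp
    obtain ⟨mx, hmx⟩ : ∃ mx, PySem.List.max? ((x :: t).reverse) (fun y => y) = some mx := by
      cases hq : PySem.List.max? ((x :: t).reverse) (fun y => y) with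
      | none => exact absurd ((PySem.List.max?_eq_none_iff _ _).mp hq) hne
      | some mx => exact ⟨mx, rfl⟩
    have hmem : mx ∈ (x :: t) := by
      have := PySem.List.max?_mem hmx
      simpa [or_comm] using this
    have hmax : ∀ y ∈ (x :: t), y ≤ mx := by
      intro y hy
      exact PySem.List.max?_isMax hmx y (by simpa [or_comm] using hy)
    have hF0 := PySem.List.le_foldl_max t (max 0 x)
    have hFm := PySem.List.foldl_max_mem t (max 0 x)
    have hx1 : (1 : Int) ≤ x := h1 x (List.mem_cons_self)
    have hgoal : (x :: t).foldl (fun m x => max m x) 0 = t.foldl max (max 0 x) := rfl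
    rw [hgoal]
    unfold PySem.List.maxD
    rw [hmx]
    simp only [Option.getD_some]
    have hle1 : t.foldl max (max 0 x) ≤ mx := by
      rcases hFm with he | hin
      · have hxm : x ≤ mx := hmax x (List.mem_cons_self)
        omega
      · exact hmax _ (List.mem_cons_of_mem _ hin)
    have hle2 : mx ≤ t.foldl max (max 0 x) := by
      rcases List.mem_cons.mp hmem with rfl | hin
      · have := hF0.1
        omega
      · exact hF0.2 mx hin
    omega

-- ===== VERDICT (by name: the statement is the Claim_ definition above) =====
theorem train_sort_spec : Claim_equal_train_sort := by
  intro weights _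
  unfold Spec_train_sort
  rw [train_sort_eq, train_sort_alt_eq]
  set Z := (dpStart cmpA weights).zip (dpStart cmpB weights) with hZ
  have hmem : ∀ x ∈ Z.map (fun p : Int × Int => p.1 + p.2 - 1), 1 ≤ x := by
    intro x hx
    obtain ⟨p, hp, rfl⟩ := List.mem_map.mp hx
    obtain ⟨hp1, hp2⟩ := List.of_mem_zip hp
    have h1 := dpStart_pos cmpA weights p.1 hp1
    have h2 := dpStart_pos cmpB weights p.2 hp2
    omega
  have hfold : Z.foldl (fun m p => max m (p.1 + p.2 - 1)) 0
      = (Z.map (fun p : Int × Int => p.1 + p.2 - 1)).foldl (fun m x => max m x) 0 := by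
    rw [List.foldl_map]
  rw [hfold, foldl_max_eq_maxD_reverse _ hmem, List.map_reverse]
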